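-- pv_equiv track=rewrite | github.com/Manstek/graph_converter_1 | graph_converter/converter/views.py | hierarchical_levels
-- ===== SOURCE A (Python) =====
-- from collections import deque
--
-- def hierarchical_levels(matrix):
--     levels = {}
--     visited = [False] * len(matrix)
--
--     # Определяем корневые вершины
--     roots = [i for i in range(len(matrix)) if all(matrix[j][i] == 0 for j in range(len(matrix)))]
--
--     # Присваиваем уровень 0 корневым вершинам
--     for root in roots:
--         levels[root] = 0
--
--     # BFS для определения уровней
--     def bfs():
--         queue = deque(roots)
--         while queue:
--             vertex = queue.popleft()
--             current_level = levels[vertex]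
--             for neighbor in range(len(matrix)):
--                 if matrix[vertex][neighbor] == 1:
--                     if neighbor not in levels:  # Если еще не посещен
--                         levels[neighbor] = current_level + 1
--                         queue.append(neighbor)
--
--     bfs()
--
--     # Преобразуем уровни в ожидаемый формат
--     level_mapping = {}
--     for vertex, level in levels.items():
--         if level not in level_mapping:
--             level_mapping[level] = []
--         level_mapping[level].append(vertex + 1)  # Нумерация с 1
--
--     return {k: level_mapping[k] for k in sorted(level_mapping)}
-- ===== SOURCE B (Python) =====
-- def hierarchical_levels(matrix):
--     n = len(matrix)
--     # roots (no incoming edge) form the level-0 frontier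
--     frontier = [i for i in range(n) if all(matrix[j][i] == 0 for j in range(n))]
--     visited = set(frontier)
--     result = {}
--     level = 0
--     while frontier:
--         result[level] = [v + 1 for v in frontier]
--         nxt = []
--         for v in frontier:
--             for w in range(n):
--                 if matrix[v][w] == 1 and w not in visited:
--                     visited.add(w)
--                     nxt.append(w)
--         frontier = nxt
--         level += 1
--     return result
-- ===== Notes on version B (the rewrite author's own statement) =====
-- stated objective: simpler
-- what changed: Replaces A's deque-based BFS into a vertex->level dict followed by a separate regrouping pass and a key sort with a single layer-by-layer frontier loop that emits each level's grouped, ordered list directly (marking vertices visited at discovery), eliminating the levels dict, the level_mapping regrouping and the sorted() call.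
-- outside the precondition, e.g. on hierarchical_levels([[1, 1], [0]]): A returns {}, B returns {}
import Mathlib
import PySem

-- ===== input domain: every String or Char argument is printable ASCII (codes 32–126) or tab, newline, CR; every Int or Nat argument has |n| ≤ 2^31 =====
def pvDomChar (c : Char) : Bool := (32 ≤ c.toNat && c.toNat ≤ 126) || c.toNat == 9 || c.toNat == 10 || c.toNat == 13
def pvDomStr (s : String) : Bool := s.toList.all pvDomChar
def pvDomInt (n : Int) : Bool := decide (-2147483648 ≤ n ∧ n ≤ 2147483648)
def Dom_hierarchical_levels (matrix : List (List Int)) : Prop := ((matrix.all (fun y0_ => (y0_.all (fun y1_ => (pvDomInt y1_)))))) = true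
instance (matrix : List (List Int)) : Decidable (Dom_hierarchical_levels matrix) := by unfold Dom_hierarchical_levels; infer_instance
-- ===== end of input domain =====

-- B replaces A's deque BFS into a levels dict + regrouping + key sort by a layer-by-layer
-- frontier loop that emits the grouped, ordered result directly (objective: simpler).

-- ===== PORT A =====

-- matrix[v][w]; both Pythons only index with v, w ∈ range(len(matrix)), which Pre_ keeps in
-- range, so List.getD is exact there
def pvElem (matrix : List (List Int)) (v w : Nat) : Int := (matrix.getD v []).getD w 0

-- '[i for i in range(len(matrix)) if all(matrix[j][i] == 0 ...)]' — the identical comprehension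
-- appears in both Pythons (A's 'roots', B's initial 'frontier'), so both ports share it
def pvRoots (matrix : List (List Int)) : List Nat :=
  (List.range matrix.length).filter
    (fun i => (List.range matrix.length).all (fun j => pvElem matrix j i == 0))

-- body of A's inner 'for neighbor in range(len(matrix))' loop
def pvStepA (matrix : List (List Int)) (v : Nat) (cl : Int)
    (st : PySem.Dict Nat Int × List Nat) (nb : Nat) : PySem.Dict Nat Int × List Nat :=
  if pvElem matrix v nb == 1 then
    if st.1.contains nb then st else (st.1.insert nb (cl + 1), st.2 ++ [nb])
  else st

-- A's 'while queue:' BFS; fuel matrix.length + 1 never runs out (each iteration past the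
-- first len(roots) ones pops a vertex freshly inserted into levels — see the lemmas)
def pvBfsA (matrix : List (List Int)) : Nat → List Nat → PySem.Dict Nat Int → PySem.Dict Nat Int
  | 0, _, levels => levels
  | _ + 1, [], levels => levels
  | fuel + 1, v :: q, levels =>
    let cl := levels.getD v 0   -- levels[vertex]; queue members are always keys, KeyError unreachable
    let st := (List.range matrix.length).foldl (pvStepA matrix v cl) (levels, q)
    pvBfsA matrix fuel st.2 st.1

-- body of A's grouping loop 'for vertex, level in levels.items()'
def pvGroupStep (lm : PySem.Dict Int (List Int)) (p : Nat × Int) : PySem.Dict Int (List Int) :=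
  let lm1 := if lm.contains p.2 then lm else lm.insert p.2 []
  lm1.insert p.2 (lm1.getD p.2 [] ++ [(p.1 : Int) + 1])

def hierarchical_levels (matrix : List (List Int)) : List (Int × List Int) :=
  let roots := pvRoots matrix
  let levels0 := roots.foldl (fun d r => d.insert r (0 : Int)) PySem.Dict.empty
  let levels := pvBfsA matrix (matrix.length + 1) roots levels0
  let lm := levels.items.foldl pvGroupStep PySem.Dict.empty
  (PySem.List.sorted lm.keys (fun k => k) false).map (fun k => (k, lm.getD k []))

-- ===== PORT B =====

-- body of B's inner 'for w in range(n)' loop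
def pvStepB (matrix : List (List Int)) (v : Nat)
    (st : PySem.Set Nat × List Nat) (w : Nat) : PySem.Set Nat × List Nat :=
  if pvElem matrix v w == 1 && !(PySem.Set.contains st.1 w) then
    (PySem.Set.add st.1 w, st.2 ++ [w])
  else st

-- body of B's 'for v in frontier' loop
def pvOuterB (matrix : List (List Int)) (st : PySem.Set Nat × List Nat) (v : Nat) :
    PySem.Set Nat × List Nat :=
  (List.range matrix.length).foldl (pvStepB matrix v) st

-- B's 'while frontier:' loop; fuel matrix.length + 1 never runs out (every iteration but the
-- last discovers at least one new vertex)
def pvLoopB (matrix : List (List Int)) :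
    Nat → PySem.Set Nat → List Nat → Int → PySem.Dict Int (List Int) → PySem.Dict Int (List Int)
  | 0, _, _, _, res => res
  | fuel + 1, vis, frontier, level, res =>
    if frontier.isEmpty then res
    else
      let res := res.insert level (frontier.map (fun v => (v : Int) + 1))
      let st := frontier.foldl (pvOuterB matrix) (vis, ([] : List Nat))
      pvLoopB matrix fuel st.1 st.2 (level + 1) res

def hierarchical_levels_alt (matrix : List (List Int)) : List (Int × List Int) :=
  let frontier := pvRoots matrix
  (pvLoopB matrix (matrix.length + 1) (PySem.Set.ofList frontier) frontier 0 PySem.Dict.empty).items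

-- ===== PRECONDITION & SPEC =====

-- Pre_ excludes the matrices with a row shorter than the number of rows: there the Python A
-- (and B alike) usually raises IndexError on matrix[j][i]; on the few such inputs where
-- short-circuiting skips the missing entries both A and B still return the same value.
def Pre_hierarchical_levels (matrix : List (List Int)) : Prop :=
  ∀ row ∈ matrix, matrix.length ≤ row.length
instance (matrix : List (List Int)) : Decidable (Pre_hierarchical_levels matrix) := by
  unfold Pre_hierarchical_levels; infer_instance

def pvWitness_hierarchical_levels : List (List Int) := [[0, 1], [0, 0]]

def Spec_hierarchical_levels (matrix : List (List Int)) (out : List (Int × List Int)) : Prop :=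
  out = hierarchical_levels_alt matrix
instance (matrix : List (List Int)) (out : List (Int × List Int)) :
    Decidable (Spec_hierarchical_levels matrix out) := by
  unfold Spec_hierarchical_levels; infer_instance

-- ===== CLAIM (what is proved, stated in full; the proofs are below) =====
def Claim_equal_hierarchical_levels : Prop :=
  ∀ (matrix : List (List Int)), Dom_hierarchical_levels matrix →
    Pre_hierarchical_levels matrix →
    Spec_hierarchical_levels matrix (hierarchical_levels matrix)

-- ===== LEMMAS AND PROOFS =====

lemma pv_inner (m : List (List Int)) (v : Nat) (c : Int) :
    ∀ (L : List Nat) (D : PySem.Dict Nat Int) (q nxt : List Nat), D.keys.Nodup →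
    ∃ delta : List Nat,
      (L.foldl (pvStepA m v c) (D, q)).1.items = D.items ++ delta.map (fun w => (w, c + 1)) ∧
      (L.foldl (pvStepA m v c) (D, q)).2 = q ++ delta ∧
      L.foldl (pvStepB m v) (D.keys, nxt) = ((L.foldl (pvStepA m v c) (D, q)).1.keys, nxt ++ delta) ∧
      (L.foldl (pvStepA m v c) (D, q)).1.keys = D.keys ++ delta ∧
      (L.foldl (pvStepA m v c) (D, q)).1.keys.Nodup ∧
      (∀ w ∈ delta, w ∈ L) := by
  intro L
  induction L with
  | nil =>
    intro D q nxt hnd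
    exact ⟨[], by simp, by simp, by simp, by simp, hnd, by simp⟩
  | cons a L ih =>
    intro D q nxt hnd
    by_cases h1 : pvElem m v a == 1
    · by_cases hc : a ∈ D.keys
      · have hca : D.contains a = true := (PySem.Dict.contains_iff_mem_keys D a).mpr hc
        have hcb : PySem.Set.contains D.keys a = true := by
          simp [hc]
        obtain ⟨delta, H1, H2, H3, H4, H5, H6⟩ := ih D q nxt hnd
        refine ⟨delta, ?_, ?_, ?_, ?_, ?_, ?_⟩
        · simpa [List.foldl_cons, pvStepA, pvStepB, h1, hca] using H1
        · simpa [List.foldl_cons, pvStepA, pvStepB, h1, hca] using H2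
        · simp only [List.foldl_cons, pvStepB, hcb, Bool.not_true, Bool.and_false, if_false, Bool.false_eq_true]
          simpa [List.foldl_cons, pvStepA, h1, hca] using H3
        · simpa [List.foldl_cons, pvStepA, pvStepB, h1, hca] using H4
        · simpa [List.foldl_cons, pvStepA, pvStepB, h1, hca] using H5
        · exact fun w hw => List.mem_cons_of_mem _ (H6 w hw)
      · have hca : D.contains a = false := by
          rw [← Bool.not_eq_true]; simp only [PySem.Dict.contains_iff_mem_keys]; exact hc
        have hcb : PySem.Set.contains D.keys a = false := by
          rw [← Bool.not_eq_true]; simp only [PySem.Set.contains_iff]; exact hc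
        have hkeys : (D.insert a (c + 1)).keys = D.keys ++ [a] :=
          PySem.Dict.keys_insert_of_not_contains D _ hca
        have hitems : (D.insert a (c + 1)).items = D.items ++ [(a, c + 1)] :=
          PySem.Dict.items_insert_of_not_contains D _ hca
        have hnd' : (D.insert a (c + 1)).keys.Nodup := PySem.Dict.nodup_keys_insert D _ _ hnd
        obtain ⟨delta, H1, H2, H3, H4, H5, H6⟩ := ih (D.insert a (c + 1)) (q ++ [a]) (nxt ++ [a]) hnd'
        refine ⟨a :: delta, ?_, ?_, ?_, ?_, ?_, ?_⟩
        · simp only [List.foldl_cons, pvStepA, h1, hca, if_true, if_false, Bool.false_eq_true]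
          rw [H1, hitems]; simp
        · simp only [List.foldl_cons, pvStepA, h1, hca, if_true, if_false, Bool.false_eq_true]
          rw [H2]; simp
        · simp only [List.foldl_cons, pvStepA, pvStepB, h1, hca, hcb, Bool.not_false, Bool.and_true,
            if_true, if_false, Bool.false_eq_true]
          rw [PySem.Set.add_of_not_mem hc, ← hkeys, H3]
          simp
        · simp only [List.foldl_cons, pvStepA, h1, hca, if_true, if_false, Bool.false_eq_true]
          rw [H4, hkeys]; simp
        · simpa [List.foldl_cons, pvStepA, h1, hca] using H5
        · intro w hw
          rcases List.mem_cons.mp hw with h | h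
          · exact h ▸ List.mem_cons_self
          · exact List.mem_cons_of_mem _ (H6 w h)
    · have h1' : (pvElem m v a == 1) = false := by simpa using h1
      obtain ⟨delta, H1, H2, H3, H4, H5, H6⟩ := ih D q nxt hnd
      refine ⟨delta, ?_, ?_, ?_, ?_, ?_, fun w hw => List.mem_cons_of_mem _ (H6 w hw)⟩ <;>
        simpa [List.foldl_cons, pvStepA, pvStepB, h1'] using ‹_›

lemma pv_layer (m : List (List Int)) (c : Int) :
    ∀ (F N nxt : List Nat) (D : PySem.Dict Nat Int) (fuel : Nat),
    D.keys.Nodup → (∀ v ∈ F, D.get? v = some c) →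
    ∃ (D' : PySem.Dict Nat Int) (delta : List Nat),
      F.foldl (pvOuterB m) (D.keys, nxt) = (D'.keys, nxt ++ delta) ∧
      pvBfsA m (F.length + fuel) (F ++ N) D = pvBfsA m fuel (N ++ delta) D' ∧
      D'.items = D.items ++ delta.map (fun w => (w, c + 1)) ∧
      D'.keys = D.keys ++ delta ∧ D'.keys.Nodup ∧
      (∀ w ∈ delta, w < m.length) := by
  intro F
  induction F with
  | nil =>
    intro N nxt D fuel hnd hF
    exact ⟨D, [], by simp, by simp, by simp, by simp, hnd, by simp⟩
  | cons v F ih =>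
    intro N nxt D fuel hnd hF
    obtain ⟨d1, H1, H2, H3, H4, H5, H6⟩ :=
      pv_inner m v c (List.range m.length) D (F ++ N) nxt hnd
    set R := (List.range m.length).foldl (pvStepA m v c) (D, F ++ N) with hR
    -- the popped vertex's level
    have hcl : D.getD v 0 = c := PySem.Dict.getD_of_get?_eq_some D 0 (hF v List.mem_cons_self)
    -- invariants for the rest of the frontier
    have hFkeep : ∀ u ∈ F, R.1.get? u = some c := by
      intro u hu
      have := PySem.Dict.mem_items_of_get?_eq_some D (hF u (List.mem_cons_of_mem _ hu))
      exact PySem.Dict.get?_of_mem_items R.1 (by rw [H1]; exact List.mem_append_left _ this) H5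
    obtain ⟨D', delta2, G1, G2, G3, G4, G5, G6⟩ := ih (N ++ d1) (nxt ++ d1) R.1 fuel H5 hFkeep
    refine ⟨D', d1 ++ delta2, ?_, ?_, ?_, ?_, G5, ?_⟩
    · rw [List.foldl_cons]
      have hout : pvOuterB m (D.keys, nxt) v = (R.1.keys, nxt ++ d1) := H3
      rw [hout, ← H4] at *
      rw [G1, List.append_assoc]
    · have harith : (v :: F).length + fuel = (F.length + fuel) + 1 := by
        simp [List.length_cons]; omega
      rw [harith]
      show pvBfsA m ((F.length + fuel) + 1) (v :: (F ++ N)) D = _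
      rw [pvBfsA]
      simp only [hcl, ← hR]
      rw [show R.2 = F ++ (N ++ d1) from by rw [H2, List.append_assoc]]
      rw [G2, List.append_assoc]
    · rw [G3, H1, List.append_assoc, ← List.map_append]
    · rw [G4, H4, List.append_assoc]
    · intro w hw
      rcases List.mem_append.mp hw with h | h
      · exact List.mem_range.mp (H6 w h)
      · exact G6 w h

def pvTailLayers (matrix : List (List Int)) :
    Nat → PySem.Set Nat → List Nat → Int → List (Nat × Int)
  | 0, _, _, _ => []
  | fb + 1, vis, F, c =>
    if F = [] then []
    else
      let st := F.foldl (pvOuterB matrix) (vis, ([] : List Nat))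
      st.2.map (fun w => (w, c + 1)) ++ pvTailLayers matrix fb st.1 st.2 (c + 1)

lemma pv_card (l : List Nat) (n : Nat) (h1 : l.Nodup) (h2 : ∀ x ∈ l, x < n) :
    l.length ≤ n := by
  have hsub : l ⊆ List.range n := fun x hx => List.mem_range.mpr (h2 x hx)
  simpa using List.Subperm.length_le (List.subperm_of_subset h1 hsub)

lemma pv_bfs_items (m : List (List Int)) :
    ∀ (ft : Nat) (F : List Nat) (D : PySem.Dict Nat Int) (c : Int),
    D.keys.Nodup → (∀ k ∈ D.keys, k < m.length) → (∀ v ∈ F, D.get? v = some c) →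
    m.length - D.size ≤ ft →
    (pvBfsA m (F.length + (m.length - D.size + 1)) F D).items
      = D.items ++ pvTailLayers m ft D.keys F c := by
  intro ft
  induction ft with
  | zero =>
    intro F D c hnd hlt hF hft
    cases F with
    | nil =>
      rw [show pvBfsA m ([].length + (m.length - D.size + 1)) [] D = D from by
        simp [pvBfsA]]
      simp [pvTailLayers]
    | cons v F =>
      obtain ⟨D', delta, G1, G2, G3, G4, G5, G6⟩ :=
        pv_layer m c (v :: F) [] [] D (m.length - D.size + 1) hnd hF
      -- delta must be empty: keys are nodup, < m.length, and already m.length of them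
      have hlen : D.keys.length + delta.length ≤ m.length := by
        have := pv_card D'.keys m.length G5 (by
          rw [G4]; intro x hx
          rcases List.mem_append.mp hx with h | h
          · exact hlt x h
          · exact G6 x h)
        rw [G4, List.length_append] at this; exact this
      have hsz : D.size = D.keys.length := by simp [PySem.Dict.size, PySem.Dict.keys]
      have hdelta : delta = [] := by
        rw [List.eq_nil_iff_length_eq_zero]; omega
      subst hdelta
      rw [show (v :: F) ++ ([] : List Nat) = v :: F from by simp] at G2
      rw [G2]
      rw [show pvBfsA m (m.length - D.size + 1) ([] ++ []) D' = D' from by simp [pvBfsA]]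
      rw [G3]
      simp [pvTailLayers]
  | succ ft ih =>
    intro F D c hnd hlt hF hft
    cases F with
    | nil =>
      rw [show pvBfsA m ([].length + (m.length - D.size + 1)) [] D = D from by
        simp [pvBfsA]]
      simp [pvTailLayers]
    | cons v F =>
      obtain ⟨D', delta, G1, G2, G3, G4, G5, G6⟩ :=
        pv_layer m c (v :: F) [] [] D (m.length - D.size + 1) hnd hF
      have hsz : D.size = D.keys.length := by simp [PySem.Dict.size, PySem.Dict.keys]
      have hsz' : D'.size = D.size + delta.length := by
        show D'.items.length = D.items.length + delta.length
        rw [G3]; simp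

      have hcard : D'.keys.length ≤ m.length := pv_card D'.keys m.length G5 (by
        rw [G4]; intro x hx
        rcases List.mem_append.mp hx with h | h
        · exact hlt x h
        · exact G6 x h)
      have hszk : D'.size = D'.keys.length := by simp [PySem.Dict.size, PySem.Dict.keys]
      rw [show (v :: F) ++ ([] : List Nat) = v :: F from by simp] at G2
      -- unfold one tail layer on the right
      have htl : pvTailLayers m (ft + 1) D.keys (v :: F) c
          = delta.map (fun w => (w, c + 1)) ++ pvTailLayers m ft D'.keys delta (c + 1) := by
        rw [pvTailLayers]
        rw [show ((v :: F).foldl (pvOuterB m) (D.keys, ([] : List Nat))) = (D'.keys, delta) from by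
          rw [G1]; simp]
        simp
      rw [htl, G2]
      cases delta with
      | nil =>
        rw [show pvBfsA m (m.length - D.size + 1) ([] ++ []) D' = D' from by simp [pvBfsA]]
        rw [G3]
        cases ft <;> simp [pvTailLayers]
      | cons w delta' =>
        have hne : (w :: delta') ≠ [] := by simp
        have hszle : D'.size ≤ m.length := by rw [hszk]; exact hcard
        have harith : m.length - D.size + 1
            = (w :: delta').length + (m.length - D'.size + 1) := by
          simp only [List.length_cons] at hsz' hszle ⊢; omega
        rw [show ([] : List Nat) ++ (w :: delta') = w :: delta' from by simp, harith]
        have hget : ∀ u ∈ w :: delta', D'.get? u = some (c + 1) := by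
          intro u hu
          apply PySem.Dict.get?_of_mem_items D' _ G5
          rw [G3]
          exact List.mem_append_right _ (List.mem_map_of_mem hu)
        have := ih (w :: delta') D' (c + 1) G5 (by
            rw [G4]; intro x hx
            rcases List.mem_append.mp hx with h | h
            · exact hlt x h
            · exact G6 x h) hget (by
            simp only [List.length_cons] at hsz' hszle hft ⊢; omega)
        rw [this, G3, List.append_assoc]

def pvBlocks (matrix : List (List Int)) :
    Nat → PySem.Set Nat → List Nat → Int → List (Int × List Int)
  | 0, _, _, _ => []
  | fb + 1, vis, F, c =>
    if F = [] then []
    else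
      let st := F.foldl (pvOuterB matrix) (vis, ([] : List Nat))
      (c, F.map (fun v => (v : Int) + 1)) :: pvBlocks matrix fb st.1 st.2 (c + 1)

lemma pv_loopB (m : List (List Int)) :
    ∀ (fb : Nat) (vis : PySem.Set Nat) (F : List Nat) (c : Int)
      (res : PySem.Dict Int (List Int)),
    (∀ k ∈ res.keys, k < c) →
    (pvLoopB m fb vis F c res).items = res.items ++ pvBlocks m fb vis F c := by
  intro fb
  induction fb with
  | zero => intro vis F c res h; simp [pvLoopB, pvBlocks]
  | succ fb ih =>
    intro vis F c res h
    cases F with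
    | nil => simp [pvLoopB, pvBlocks]
    | cons v F =>
      rw [pvLoopB, pvBlocks]
      simp only [List.isEmpty_cons, if_false, Bool.false_eq_true]
      have hcon : res.contains c = false := by
        rw [← Bool.not_eq_true]
        simp only [PySem.Dict.contains_iff_mem_keys]
        intro hc; exact absurd rfl (ne_of_lt (h c hc))
      have hit : (res.insert c ((v :: F).map (fun u => (u : Int) + 1))).items
          = res.items ++ [(c, (v :: F).map (fun u => (u : Int) + 1))] :=
        PySem.Dict.items_insert_of_not_contains res _ hcon
      have hkeys : (res.insert c ((v :: F).map (fun u => (u : Int) + 1))).keys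
          = res.keys ++ [c] :=
        PySem.Dict.keys_insert_of_not_contains res _ hcon
      rw [ih _ _ _ _ (by
        rw [hkeys]; intro k hk
        rcases List.mem_append.mp hk with hk | hk
        · exact lt_trans (h k hk) (by omega)
        · simp at hk; omega)]
      rw [hit]
      simp [List.append_assoc]

lemma pv_group_run (F : List Nat) :
    ∀ (lm0 : PySem.Dict Int (List Int)) (c : Int) (cur : List Int),
    (F.map (fun v => (v, c))).foldl pvGroupStep (lm0.insert c cur)
      = lm0.insert c (cur ++ F.map (fun v => (v : Int) + 1)) := by
  induction F with
  | nil => intro lm0 c cur; simp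
  | cons v F ih =>
    intro lm0 c cur
    rw [List.map_cons, List.foldl_cons]
    have hstep : pvGroupStep (lm0.insert c cur) (v, c)
        = lm0.insert c (cur ++ [(v : Int) + 1]) := by
      unfold pvGroupStep
      simp only [PySem.Dict.contains_insert_self, if_true]
      rw [PySem.Dict.getD_insert_self, PySem.Dict.insert_insert_self]
    rw [hstep, ih]
    simp

lemma pv_group_tail (m : List (List Int)) :
    ∀ (fb : Nat) (vis : PySem.Set Nat) (F : List Nat) (c : Int)
      (lm : PySem.Dict Int (List Int)),
    (∀ k ∈ lm.keys, k < c) →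
    ((F.map (fun v => (v, c)) ++ pvTailLayers m fb vis F c).foldl pvGroupStep lm).items
      = lm.items ++ pvBlocks m (fb + 1) vis F c := by
  have block : ∀ (F' : List Nat) (v : Nat) (lm : PySem.Dict Int (List Int)) (c : Int),
      (∀ k ∈ lm.keys, k < c) →
      ((v :: F').map (fun u => (u, c))).foldl pvGroupStep lm
        = lm.insert c (((v :: F').map (fun u => (u : Int) + 1))) ∧
      lm.contains c = false := by
    intro F' v lm c h
    have hcon : lm.contains c = false := by
      rw [← Bool.not_eq_true]
      simp only [PySem.Dict.contains_iff_mem_keys]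
      intro hc; exact absurd rfl (ne_of_lt (h c hc))
    constructor
    · rw [List.map_cons, List.foldl_cons]
      have hstep : pvGroupStep lm (v, c) = lm.insert c [(v : Int) + 1] := by
        unfold pvGroupStep
        simp only [hcon, if_false, Bool.false_eq_true]
        rw [PySem.Dict.getD_insert_self, PySem.Dict.insert_insert_self]
        simp
      rw [hstep, pv_group_run]
      simp
    · exact hcon
  intro fb
  induction fb with
  | zero =>
    intro vis F c lm h
    cases F with
    | nil => simp [pvTailLayers, pvBlocks]
    | cons v F =>
      obtain ⟨hb, hcon⟩ := block F v lm c h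
      rw [pvTailLayers, pvBlocks]
      simp only [if_neg (List.cons_ne_nil v F), List.append_nil]
      rw [hb, PySem.Dict.items_insert_of_not_contains lm _ hcon]
      simp [pvBlocks]
  | succ fb ih =>
    intro vis F c lm h
    cases F with
    | nil => simp [pvTailLayers, pvBlocks]
    | cons v F =>
      obtain ⟨hb, hcon⟩ := block F v lm c h
      rw [pvTailLayers, pvBlocks]
      simp only [if_neg (List.cons_ne_nil v F)]
      rw [List.foldl_append] at *
      rw [hb]
      have hkeys : (lm.insert c ((v :: F).map (fun u => (u : Int) + 1))).keys
          = lm.keys ++ [c] :=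
        PySem.Dict.keys_insert_of_not_contains lm _ hcon
      have := ih ((v :: F).foldl (pvOuterB m) (vis, [])).1
        ((v :: F).foldl (pvOuterB m) (vis, [])).2 (c + 1)
        (lm.insert c ((v :: F).map (fun u => (u : Int) + 1))) (by
          rw [hkeys]; intro k hk
          rcases List.mem_append.mp hk with hk | hk
          · exact lt_trans (h k hk) (by omega)
          · simp at hk; omega)
      rw [this]
      rw [PySem.Dict.items_insert_of_not_contains lm _ hcon]
      simp [List.append_assoc]

lemma pv_blocks_le (m : List (List Int)) :
    ∀ (fb : Nat) (vis : PySem.Set Nat) (F : List Nat) (c : Int),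
    ∀ p ∈ pvBlocks m fb vis F c, c ≤ p.1 := by
  intro fb
  induction fb with
  | zero => intro vis F c p hp; simp [pvBlocks] at hp
  | succ fb ih =>
    intro vis F c p hp
    cases F with
    | nil => simp [pvBlocks] at hp
    | cons v F =>
      rw [pvBlocks, if_neg (List.cons_ne_nil v F)] at hp
      rcases List.mem_cons.mp hp with h | h
      · subst h; simp
      · exact le_trans (by omega) (ih _ _ _ p h)

lemma pv_blocks_pairwise (m : List (List Int)) :
    ∀ (fb : Nat) (vis : PySem.Set Nat) (F : List Nat) (c : Int),
    (pvBlocks m fb vis F c).Pairwise (fun a b => a.1 < b.1) := by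
  intro fb
  induction fb with
  | zero => intro vis F c; simp [pvBlocks]
  | succ fb ih =>
    intro vis F c
    cases F with
    | nil => simp [pvBlocks]
    | cons v F =>
      rw [pvBlocks, if_neg (List.cons_ne_nil v F)]
      refine List.Pairwise.cons ?_ (ih _ _ _)
      intro p hp
      have := pv_blocks_le m fb _ _ (c + 1) p hp
      simpa using lt_of_lt_of_le (by omega) this

theorem hl_eq (m : List (List Int)) : hierarchical_levels m = hierarchical_levels_alt m := by
  have hrtnd : (pvRoots m).Nodup := List.Nodup.filter _ (List.nodup_range)
  have hrtlt : ∀ v ∈ pvRoots m, v < m.length := by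
    intro v hv
    exact List.mem_range.mp (List.mem_of_mem_filter hv)
  have hrtlen : (pvRoots m).length ≤ m.length := by
    have := List.length_filter_le
      (fun i => (List.range m.length).all (fun j => pvElem m j i == 0)) (List.range m.length)
    simpa [pvRoots] using this
  set rt := pvRoots m with hrt
  set D0 := rt.foldl (fun d r => d.insert r (0 : Int)) PySem.Dict.empty with hD0
  have hitems0 : D0.items = rt.map (fun a => (a, (0 : Int))) := by
    rw [hD0]
    have := PySem.Dict.items_foldl_insert_fresh rt (fun a => a) (fun _ => (0 : Int))
      PySem.Dict.empty (by intro a _; simp) (by simpa using hrtnd)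
    simpa using this
  have hkeys0 : D0.keys = rt := by
    show D0.items.map Prod.fst = rt
    rw [hitems0]; simp [Function.comp_def]
  have hnd0 : D0.keys.Nodup := by rw [hkeys0]; exact hrtnd
  have hsz0 : D0.size = rt.length := by
    show D0.items.length = rt.length
    rw [hitems0]; simp
  have hget0 : ∀ v ∈ rt, D0.get? v = some 0 := by
    intro v hv
    exact PySem.Dict.get?_of_mem_items D0 (by rw [hitems0]; exact List.mem_map_of_mem hv) hnd0
  have hfuel : m.length + 1 = rt.length + (m.length - D0.size + 1) := by
    rw [hsz0]; omega
  have hbfs : (pvBfsA m (m.length + 1) rt D0).items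
      = rt.map (fun a => (a, (0 : Int))) ++ pvTailLayers m m.length rt rt 0 := by
    rw [hfuel, pv_bfs_items m m.length rt D0 0 hnd0 (by rw [hkeys0]; exact hrtlt) hget0 (by omega)]
    rw [hitems0, hkeys0]
  set lm := (pvBfsA m (m.length + 1) rt D0).items.foldl pvGroupStep PySem.Dict.empty with hlm
  have hlmitems : lm.items = pvBlocks m (m.length + 1) rt rt 0 := by
    rw [hlm, hbfs]
    have hmap : rt.map (fun a => (a, (0 : Int))) = rt.map (fun v => (v, (0 : Int))) := rfl
    rw [hmap]
    rw [pv_group_tail m m.length rt rt 0 PySem.Dict.empty (by simp [PySem.Dict.keys_empty])]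
    rfl
  have hpw : lm.keys.Pairwise (fun a b => a < b) := by
    show (lm.items.map Prod.fst).Pairwise _
    rw [hlmitems]
    exact List.pairwise_map.mpr (pv_blocks_pairwise m _ _ _ _)
  have hndlm : lm.keys.Nodup := hpw.imp (fun h => ne_of_lt h)
  -- A's final sort + rebuild is the items list itself
  have hsorted : PySem.List.sorted lm.keys (fun k => k) false = lm.keys :=
    PySem.List.sorted_eq_self_of_pairwise lm.keys (fun k => k) (hpw.imp (fun h => le_of_lt h))
  have hA : hierarchical_levels m = lm.items := by
    show (PySem.List.sorted lm.keys (fun k => k) false).map (fun k => (k, lm.getD k [])) = lm.items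
    rw [hsorted]
    exact (PySem.Dict.items_eq_map_keys lm hndlm []).symm
  have hB : hierarchical_levels_alt m = pvBlocks m (m.length + 1) rt rt 0 := by
    show (pvLoopB m (m.length + 1) (PySem.Set.ofList rt) rt 0 PySem.Dict.empty).items = _
    rw [PySem.Set.ofList_eq_self_of_nodup rt hrtnd]
    rw [pv_loopB m (m.length + 1) rt rt 0 PySem.Dict.empty (by simp [PySem.Dict.keys_empty])]
    rfl
  rw [hA, hB, hlmitems]

-- ===== VERDICT (by name: the statement is the Claim_ definition above) =====
theorem hierarchical_levels_spec : Claim_equal_hierarchical_levels := by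
  intro matrix _ _
  show hierarchical_levels matrix = hierarchical_levels_alt matrix
  exact hl_eq matrix
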